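-- pv_equiv track=rewrite | github.com/troleqmaster816/stronaszkoly | server/scripts/documents_scraper.py | assign_tokens_to_columns
-- ===== SOURCE A (Python) =====
-- from functools import lru_cache
--
-- def assign_tokens_to_columns(tokens, columns):
--     positions = [position for position, _ in tokens]
--     values = [value for _, value in tokens]
--
--     @lru_cache(maxsize=None)
--     def dp(token_index, column_index):
--         if token_index == len(tokens):
--             return 0, ()
--         if column_index == len(columns):
--             return 10**9, ()
--
--         skip_cost, skip_path = dp(token_index, column_index + 1)
--         take_cost, take_path = dp(token_index + 1, column_index + 1)
--         take_cost += abs(positions[token_index] - columns[column_index])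
--
--         if take_cost <= skip_cost:
--             return take_cost, ((column_index, values[token_index]),) + take_path
--         return skip_cost, skip_path
--
--     return dict(dp(0, 0)[1])
-- ===== SOURCE B (Python) =====
-- def assign_tokens_to_columns(tokens, columns):
--     T, C = len(tokens), len(columns)
--     BIG = 10 ** 9
--     # cost[ti][ci] = minimal cost of matching tokens[ti:] into columns[ci:]
--     cost = [[0] * (C + 1) for _ in range(T + 1)]
--     for ti in range(T - 1, -1, -1):
--         row = cost[ti]
--         nxt = cost[ti + 1]
--         row[C] = BIG
--         p = tokens[ti][0]
--         for ci in range(C - 1, -1, -1):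
--             take = nxt[ci + 1] + abs(p - columns[ci])
--             skip = row[ci + 1]
--             row[ci] = take if take <= skip else skip
--     # reconstruct the chosen path with the same tie-break (take when take <= skip)
--     result = {}
--     ti = ci = 0
--     while ti < T and ci < C:
--         take = cost[ti + 1][ci + 1] + abs(tokens[ti][0] - columns[ci])
--         if take <= cost[ti][ci + 1]:
--             result[ci] = tokens[ti][1]
--             ti += 1
--         ci += 1
--     return result
-- ===== Notes on version B (the rewrite author's own statement) =====
-- stated objective: faster
-- what changed: Replaces the memoized recursion that builds a path tuple in every state (tuple concatenation makes it O(T^2*C) with heavy lru_cache overhead) by an iterative bottom-up DP table of costs only, followed by a single forward backtracking walk with the same tie-break (take when take <= skip) to reconstruct the assignment.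
import Mathlib
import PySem

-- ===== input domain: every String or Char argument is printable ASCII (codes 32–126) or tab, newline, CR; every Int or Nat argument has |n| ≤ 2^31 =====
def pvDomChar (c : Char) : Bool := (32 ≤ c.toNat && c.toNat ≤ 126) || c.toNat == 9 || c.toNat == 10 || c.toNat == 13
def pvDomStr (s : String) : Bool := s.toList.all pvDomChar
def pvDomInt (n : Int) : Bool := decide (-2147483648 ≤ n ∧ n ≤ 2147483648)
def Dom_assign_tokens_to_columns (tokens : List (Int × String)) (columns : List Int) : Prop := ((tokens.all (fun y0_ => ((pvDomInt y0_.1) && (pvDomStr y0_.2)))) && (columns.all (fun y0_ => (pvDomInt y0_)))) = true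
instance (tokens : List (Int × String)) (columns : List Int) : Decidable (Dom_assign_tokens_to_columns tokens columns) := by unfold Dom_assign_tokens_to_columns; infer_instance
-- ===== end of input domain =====

-- B replaces A's memoized path-building recursion by a cost-only DP table plus a
-- backtracking walk with the same tie-break (measured faster on large inputs).

-- ===== PORT A =====
-- dp(token_index, column_index): literal port of A's inner recursion.
-- 'columns.length ≤ ci' is Python's 'column_index == len(columns)': every call
-- keeps ci ≤ len(columns), and '≤' gives the termination measure; getD is exact
-- since both indices are in range on the branches that use them.
def pyDP (tokens : List (Int × String)) (columns : List Int) (ti ci : Nat) :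
    Int × List (Int × String) :=
  if ti = tokens.length then (0, [])
  else if h : columns.length ≤ ci then ((10 : Int) ^ 9, [])
  else
    let skip := pyDP tokens columns ti (ci + 1)
    let take := pyDP tokens columns (ti + 1) (ci + 1)
    let takeCost := take.1 + |(tokens.getD ti (0, "")).1 - columns.getD ci 0|
    if takeCost ≤ skip.1 then
      (takeCost, ((ci : Int), (tokens.getD ti (0, "")).2) :: take.2)
    else skip
  termination_by columns.length - ci
  decreasing_by all_goals omega

-- dict(dp(0,0)[1])
def assign_tokens_to_columns (tokens : List (Int × String)) (columns : List Int) : List (Int × String) :=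
  (((pyDP tokens columns 0 0).2).foldl (fun d p => d.insert p.1 p.2)
      (PySem.Dict.empty : PySem.Dict Int String)).items

-- ===== PORT B =====
-- One cost row, filled right-to-left from the next token's row (Source B's inner loop;
-- the structural recursion produces the same cells in the same right-to-left order).
def bRow (p : Int) : List Int → List Int → List Int
  | [], _ => [(10 : Int) ^ 9]
  | c :: cs, nxt =>
    let r := bRow p cs nxt.tail
    let take := nxt.tail.headD 0 + |p - c|
    let skip := r.headD 0
    (if take ≤ skip then take else skip) :: r

-- The full table, rows built bottom-up (Source B's outer loop over ti = T-1 … 0).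
def bTable : List (Int × String) → List Int → List (List Int)
  | [], columns => [List.replicate (columns.length + 1) 0]
  | t :: ts, columns =>
    let rest := bTable ts columns
    bRow t.1 columns (rest.headD []) :: rest

-- Source B's forward while-loop reconstructing the chosen assignment.
def bWalk (tokens : List (Int × String)) (columns : List Int)
    (table : List (List Int)) (ti ci : Nat) : List (Int × String) :=
  if h : ti < tokens.length ∧ ci < columns.length then
    let take := ((table.getD (ti + 1) []).getD (ci + 1) 0) +
      |(tokens.getD ti (0, "")).1 - columns.getD ci 0|
    let skip := (table.getD ti []).getD (ci + 1) 0
    if take ≤ skip then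
      ((ci : Int), (tokens.getD ti (0, "")).2) :: bWalk tokens columns table (ti + 1) (ci + 1)
    else bWalk tokens columns table ti (ci + 1)
  else []
  termination_by columns.length - ci
  decreasing_by all_goals omega

def assign_tokens_to_columns_alt (tokens : List (Int × String)) (columns : List Int) : List (Int × String) :=
  bWalk tokens columns (bTable tokens columns) 0 0

-- ===== PRECONDITION & SPEC =====
def Spec_assign_tokens_to_columns (tokens : List (Int × String)) (columns : List Int) (out : List (Int × String)) : Prop := out = assign_tokens_to_columns_alt tokens columns
instance (tokens : List (Int × String)) (columns : List Int) (out : List (Int × String)) : Decidable (Spec_assign_tokens_to_columns tokens columns out) := by unfold Spec_assign_tokens_to_columns; infer_instance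

-- ===== CLAIM (what is proved, stated in full; the proofs are below) =====
def Claim_equal_assign_tokens_to_columns : Prop := ∀ (tokens : List (Int × String)) (columns : List Int), Dom_assign_tokens_to_columns tokens columns → Spec_assign_tokens_to_columns tokens columns (assign_tokens_to_columns tokens columns)

-- ===== LEMMAS AND PROOFS =====

theorem getD_eq_headD_drop {α : Type} (l : List α) (k : Nat) (d : α) :
    l.getD k d = (l.drop k).headD d := by
  induction l generalizing k with
  | nil => cases k <;> rfl
  | cons a l ih => cases k with
    | zero => rfl
    | succ k => simpa using ih k

theorem bRow_getD (p : Int) (cols nxt : List Int) (ci : Nat) (h : ci ≤ cols.length) :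
    (bRow p cols nxt).getD ci 0 = (bRow p (cols.drop ci) (nxt.drop ci)).headD 0 := by
  induction ci generalizing cols nxt with
  | zero =>
    rw [getD_eq_headD_drop]
    simp only [List.drop_zero]
  | succ ci ih =>
    cases cols with
    | nil => simp at h
    | cons c cs =>
      have h1 : (bRow p (c :: cs) nxt).getD (ci + 1) 0 = (bRow p cs nxt.tail).getD ci 0 := by
        simp [bRow]
      have h2 : nxt.tail.drop ci = nxt.drop (ci + 1) := by
        rw [← List.drop_one, List.drop_drop]
        congr 1
        omega
      rw [h1, ih cs nxt.tail (by simpa using h), List.drop_succ_cons, h2]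

theorem bTable_getD (tokens : List (Int × String)) (columns : List Int) (ti : Nat)
    (h : ti ≤ tokens.length) :
    (bTable tokens columns).getD ti [] = (bTable (tokens.drop ti) columns).headD [] := by
  induction tokens generalizing ti with
  | nil =>
    have hti : ti = 0 := by simpa using h
    subst hti
    rw [getD_eq_headD_drop]
    simp only [List.drop_zero]
  | cons t ts ih =>
    cases ti with
    | zero =>
      rw [getD_eq_headD_drop]
      simp only [List.drop_zero]
    | succ ti =>
      have : (bTable (t :: ts) columns).getD (ti + 1) [] = (bTable ts columns).getD ti [] := by
        simp [bTable, List.getD_cons_succ]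
      rw [this, ih ti (by simpa using h)]
      rfl

-- the table cell (ti, ci), via the head of the row built for the token suffix
def cellAt (tokens : List (Int × String)) (columns : List Int) (ti ci : Nat) : Int :=
  ((bTable tokens columns).getD ti []).getD ci 0

theorem cellAt_last_row (tokens : List (Int × String)) (columns : List Int) (ci : Nat)
    (h : ci ≤ columns.length) :
    cellAt tokens columns tokens.length ci = 0 := by
  unfold cellAt
  rw [bTable_getD tokens columns _ (le_refl _)]
  simp [bTable, List.getD_replicate]

theorem cellAt_last_col (tokens : List (Int × String)) (columns : List Int) (ti : Nat)
    (h : ti < tokens.length) :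
    cellAt tokens columns ti columns.length = (10 : Int) ^ 9 := by
  unfold cellAt
  rw [bTable_getD tokens columns _ (le_of_lt h)]
  obtain ⟨t, ts, hts⟩ : ∃ t ts, tokens.drop ti = t :: ts := by
    have : tokens.drop ti ≠ [] := by simp [List.drop_eq_nil_iff]; omega
    cases hd : tokens.drop ti with
    | nil => exact absurd hd this
    | cons a l => exact ⟨a, l, rfl⟩
  rw [hts]
  simp only [bTable, List.headD_cons]
  rw [bRow_getD _ _ _ _ (le_refl _)]
  simp [bRow]

theorem cellAt_step (tokens : List (Int × String)) (columns : List Int) (ti ci : Nat)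
    (hti : ti < tokens.length) (hci : ci < columns.length) :
    cellAt tokens columns ti ci =
      (if cellAt tokens columns (ti + 1) (ci + 1) +
            |(tokens.getD ti (0, "")).1 - columns.getD ci 0| ≤
          cellAt tokens columns ti (ci + 1)
        then cellAt tokens columns (ti + 1) (ci + 1) +
            |(tokens.getD ti (0, "")).1 - columns.getD ci 0|
        else cellAt tokens columns ti (ci + 1)) := by
  obtain ⟨t, ts, hts⟩ : ∃ t ts, tokens.drop ti = t :: ts := by
    have : tokens.drop ti ≠ [] := by simp [List.drop_eq_nil_iff]; omega
    cases hd : tokens.drop ti with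
    | nil => exact absurd hd this
    | cons a l => exact ⟨a, l, rfl⟩
  obtain ⟨c, cs, hcs⟩ : ∃ c cs, columns.drop ci = c :: cs := by
    have : columns.drop ci ≠ [] := by simp [List.drop_eq_nil_iff]; omega
    cases hd : columns.drop ci with
    | nil => exact absurd hd this
    | cons a l => exact ⟨a, l, rfl⟩
  have ht0 : tokens.getD ti (0, "") = t := by
    rw [getD_eq_headD_drop, hts]; rfl
  have hc0 : columns.getD ci 0 = c := by
    rw [getD_eq_headD_drop, hcs]; rfl
  -- name the rows
  have hrow : (bTable tokens columns).getD ti [] =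
      bRow t.1 columns ((bTable ts columns).headD []) := by
    rw [bTable_getD tokens columns ti (le_of_lt hti), hts]
    rfl
  have hnextrow : (bTable tokens columns).getD (ti + 1) [] = (bTable ts columns).headD [] := by
    rw [bTable_getD tokens columns (ti + 1) (by omega)]
    have : tokens.drop (ti + 1) = ts := by
      have := List.tail_drop (l := tokens) (i := ti)
      rw [hts] at this
      simpa using this.symm
    rw [this]
  -- unfold the cell at (ti, ci)
  unfold cellAt
  rw [hrow, bRow_getD _ _ _ _ (le_of_lt hci), hcs]
  simp only [bRow, List.headD_cons]
  -- identify take and skip with cells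
  have htake : (((bTable ts columns).headD []).drop ci).tail.headD 0 =
      cellAt tokens columns (ti + 1) (ci + 1) := by
    unfold cellAt
    rw [hnextrow, getD_eq_headD_drop, List.tail_drop]
  have hskip : (bRow t.1 cs ((((bTable ts columns).headD []).drop ci).tail)).headD 0 =
      cellAt tokens columns ti (ci + 1) := by
    unfold cellAt
    rw [hrow, bRow_getD _ _ _ _ hci]
    have h1 : columns.drop (ci + 1) = cs := by
      have := List.tail_drop (l := columns) (i := ci)
      rw [hcs] at this
      simpa using this.symm
    have h2 : ((bTable ts columns).headD []).drop (ci + 1) =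
        (((bTable ts columns).headD []).drop ci).tail := by
      rw [List.tail_drop]
    rw [h1, h2]
  rw [htake, hskip, ht0, hc0]
  have e2 : (bRow t.1 columns ((bTable ts columns).headD [])).getD (ci + 1) 0 =
      cellAt tokens columns ti (ci + 1) := by
    unfold cellAt
    rw [hrow]
  rw [show ((bTable tokens columns).getD (ti + 1) []).getD (ci + 1) 0 =
      cellAt tokens columns (ti + 1) (ci + 1) from rfl, e2]

-- the cost component of A's dp equals B's table cell
theorem cost_eq (tokens : List (Int × String)) (columns : List Int) :
    ∀ (k ti ci : Nat), columns.length - ci ≤ k → ti ≤ tokens.length → ci ≤ columns.length →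
      (pyDP tokens columns ti ci).1 = cellAt tokens columns ti ci := by
  intro k
  induction k with
  | zero =>
    intro ti ci hk hti hci
    have hc : ci = columns.length := by omega
    subst hc
    rw [pyDP]
    by_cases h : ti = tokens.length
    · subst h; simp [cellAt_last_row tokens columns _ (le_refl _)]
    · have hti' : ti < tokens.length := by omega
      simp [h, cellAt_last_col tokens columns ti hti']
  | succ k ih =>
    intro ti ci hk hti hci
    by_cases h : ti = tokens.length
    · subst h; rw [pyDP]; simp [cellAt_last_row tokens columns ci hci]
    by_cases hc : ci = columns.length
    · subst hc
      rw [pyDP]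
      have hti' : ti < tokens.length := by omega
      simp [h, cellAt_last_col tokens columns ti hti']
    have hti' : ti < tokens.length := by omega
    have hci' : ci < columns.length := by omega
    rw [pyDP, cellAt_step tokens columns ti ci hti' hci']
    have iskip := ih ti (ci + 1) (by omega) hti (by omega)
    have itake := ih (ti + 1) (ci + 1) (by omega) (by omega) (by omega)
    simp only [h, if_false, if_neg (by omega : ¬ columns.length ≤ ci), dif_neg (by omega : ¬ columns.length ≤ ci)]
    rw [itake, iskip]
    split
    · rfl
    · exact iskip

-- the path component of A's dp equals B's backtracking walk
theorem path_eq (tokens : List (Int × String)) (columns : List Int) :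
    ∀ (k ti ci : Nat), columns.length - ci ≤ k → ti ≤ tokens.length → ci ≤ columns.length →
      (pyDP tokens columns ti ci).2 = bWalk tokens columns (bTable tokens columns) ti ci := by
  intro k
  induction k with
  | zero =>
    intro ti ci hk hti hci
    have hc : ci = columns.length := by omega
    subst hc
    rw [pyDP, bWalk]
    by_cases h : ti = tokens.length <;> simp [h]
  | succ k ih =>
    intro ti ci hk hti hci
    by_cases h : ti = tokens.length
    · subst h; rw [pyDP, bWalk]; simp
    by_cases hc : ci = columns.length
    · subst hc; rw [pyDP, bWalk]; simp [h]
    have hti' : ti < tokens.length := by omega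
    have hci' : ci < columns.length := by omega
    rw [pyDP, bWalk]
    have itakeC := cost_eq tokens columns (k + 1) (ti + 1) (ci + 1) (by omega) (by omega) (by omega)
    have iskipC := cost_eq tokens columns (k + 1) ti (ci + 1) (by omega) hti (by omega)
    have itakeP := ih (ti + 1) (ci + 1) (by omega) (by omega) (by omega)
    have iskipP := ih ti (ci + 1) (by omega) hti (by omega)
    simp only [h, if_false, dif_neg (by omega : ¬ columns.length ≤ ci),
      dif_pos (⟨hti', hci'⟩ : ti < tokens.length ∧ ci < columns.length)]
    rw [show (pyDP tokens columns ti (ci+1)).1 = cellAt tokens columns ti (ci+1) from iskipC,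
        show (pyDP tokens columns (ti+1) (ci+1)).1 = cellAt tokens columns (ti+1) (ci+1) from itakeC]
    unfold cellAt
    split <;> simp [itakeP, iskipP]

-- A's path has strictly increasing column indices, all ≥ ci
theorem path_keys_incr (tokens : List (Int × String)) (columns : List Int) :
    ∀ (k ti ci : Nat), columns.length - ci ≤ k →
      ((pyDP tokens columns ti ci).2).Pairwise (fun a b => a.1 < b.1) ∧
      ∀ p ∈ (pyDP tokens columns ti ci).2, (ci : Int) ≤ p.1 := by
  intro k
  induction k with
  | zero =>
    intro ti ci hk
    rw [pyDP]
    by_cases h : ti = tokens.length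
    · simp [h]
    · simp [h, if_pos (by omega : columns.length ≤ ci), dif_pos (by omega : columns.length ≤ ci)]
  | succ k ih =>
    intro ti ci hk
    rw [pyDP]
    by_cases h : ti = tokens.length
    · simp [h]
    by_cases hc : columns.length ≤ ci
    · simp [h, hc]
    simp only [h, if_false, dif_neg hc]
    obtain ⟨htP, htB⟩ := ih (ti + 1) (ci + 1) (by omega)
    obtain ⟨hsP, hsB⟩ := ih ti (ci + 1) (by omega)
    split
    · refine ⟨List.pairwise_cons.mpr ⟨?_, htP⟩, ?_⟩
      · intro b hb
        have := htB b hb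
        push_cast at this ⊢
        omega
      · intro p hp
        rcases List.mem_cons.mp hp with h1 | h2
        · simp [h1]
        · have := htB p h2
          push_cast at this ⊢
          omega
    · refine ⟨hsP, fun p hp => ?_⟩
      have := hsB p hp
      push_cast at this ⊢
      omega

-- folding insert over pairs with distinct keys reproduces the list
theorem dict_of_nodup_keys (l : List (Int × String))
    (h : (l.map Prod.fst).Nodup) :
    ((l.foldl (fun d p => d.insert p.1 p.2) (PySem.Dict.empty : PySem.Dict Int String)).items) = l := by
  have := PySem.Dict.items_foldl_insert_fresh (l := l) (k := Prod.fst) (v := Prod.snd)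
    (d := (PySem.Dict.empty : PySem.Dict Int String)) (by simp) h
  simpa using this

-- ===== VERDICT (by name: the statement is the Claim_ definition above) =====
theorem assign_tokens_to_columns_spec : Claim_equal_assign_tokens_to_columns := by
  intro tokens columns _
  unfold Spec_assign_tokens_to_columns assign_tokens_to_columns assign_tokens_to_columns_alt
  have hpath := path_eq tokens columns columns.length 0 0 (by omega) (by omega) (by omega)
  have hincr := (path_keys_incr tokens columns columns.length 0 0 (by omega)).1
  have hnodup : (((pyDP tokens columns 0 0).2).map Prod.fst).Nodup := by
    rw [List.Nodup, List.pairwise_map]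
    exact hincr.imp fun h => ne_of_lt h
  rw [dict_of_nodup_keys _ hnodup, hpath]
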